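-- pv_equiv track=rewrite | github.com/puzzleCatcher/autotype | autotype.py | typoKey
-- ===== SOURCE A (Python) =====
-- keys = [
--   ["q","w","e","r","t","y","u","i","o","p"],
--   ["a","s","d","f","g","h","j","k","l"],
--   ["z","x","c","v","b","n","m"]
-- ]
--
-- def typoKey(key):
--     lKey = key.lower()
--
--     for row in keys:
--         if lKey in row:
--             if (len(row) == row.index(lKey) + 1):
--                 return row[row.index(lKey) - 1]
--             else:
--                 return row[row.index(lKey) + 1]
--
--     return key
-- ===== SOURCE B (Python) =====
-- # Flat translation table: SRC[i] is a key, DST[i] is the adjacent key typed instead.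
-- SRC = "qwertyuiopasdfghjklzxcvbnm"
-- DST = "wertyuioposdfghjklkxcvbnmn"
--
-- def typoKey(key):
--     l = key.lower()
--     return next((d for s, d in zip(SRC, DST) if s == l), key)
-- ===== Notes on version B (the rewrite author's own statement) =====
-- stated objective: alternative
-- what changed: B replaces A's nested row lists, membership tests, repeated list.index calls and last-column +/-1 index arithmetic with two precomputed aligned translation strings (SRC[i] -> DST[i]) and a single first-match scan over their zip, so no row structure or index arithmetic exists at call time.
import Mathlib
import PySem

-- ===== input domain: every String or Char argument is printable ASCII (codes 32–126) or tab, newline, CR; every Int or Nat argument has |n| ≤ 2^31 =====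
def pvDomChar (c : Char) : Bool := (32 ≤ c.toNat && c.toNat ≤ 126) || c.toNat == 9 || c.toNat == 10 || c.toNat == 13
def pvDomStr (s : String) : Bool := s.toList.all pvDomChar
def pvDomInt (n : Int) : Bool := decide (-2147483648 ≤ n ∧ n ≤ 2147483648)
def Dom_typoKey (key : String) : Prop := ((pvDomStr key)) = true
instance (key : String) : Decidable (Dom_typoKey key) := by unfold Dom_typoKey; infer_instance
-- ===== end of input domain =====

-- B trades A's nested row lists, list.index calls and last-column index arithmetic
-- for two precomputed aligned translation strings scanned once per call (objective: alternative).

-- ===== PORT A =====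
-- the module constant `keys`
def kbKeys : List (List String) :=
  [["q","w","e","r","t","y","u","i","o","p"],
   ["a","s","d","f","g","h","j","k","l"],
   ["z","x","c","v","b","n","m"]]

-- A's `for row in keys` loop with its early returns; `key` is returned after the loop
def typoScan (key lKey : String) : List (List String) → String
  | [] => key
  | row :: rest =>
    if row.contains lKey then
      match PySem.List.index? row lKey with
      | some i =>
          if (row.length : Int) = (i : Int) + 1 then
            PySem.List.pyGetD row ((i : Int) - 1) key   -- default never used: index in range
          else
            PySem.List.pyGetD row ((i : Int) + 1) key
      | none => key                                      -- unreachable: contains lKey holds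
    else typoScan key lKey rest

def typoKey (key : String) : String :=
  let lKey := PySem.Str.lower key
  typoScan key lKey kbKeys

-- ===== PORT B =====
-- Source B's module constants SRC and DST (aligned translation strings)
def kbSrc : String := "qwertyuiopasdfghjklzxcvbnm"
def kbDst : String := "wertyuioposdfghjklkxcvbnmn"

-- `next((d for s, d in zip(SRC, DST) if s == l), key)`: first match, else default.
-- zip over Python strings yields pairs of 1-character strings.
def typoFirst (l : String) : List (String × String) → Option String
  | [] => none
  | p :: rest => if p.1 = l then some p.2 else typoFirst l rest

def typoKey_alt (key : String) : String :=
  let l := PySem.Str.lower key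
  (typoFirst l ((kbSrc.toList.map (fun c => String.ofList [c])).zip
                (kbDst.toList.map (fun c => String.ofList [c])))).getD key

-- ===== PRECONDITION & SPEC =====
def Spec_typoKey (key : String) (out : String) : Prop := out = typoKey_alt key
instance (key : String) (out : String) : Decidable (Spec_typoKey key out) := by unfold Spec_typoKey; infer_instance

-- ===== CLAIM (what is proved, stated in full; the proofs are below) =====
def Claim_equal_typoKey : Prop := ∀ (key : String), Dom_typoKey key → Spec_typoKey key (typoKey key)

-- ===== LEMMAS AND PROOFS =====
-- core: for any lowered key l, A's row scan agrees with B's flat translation scan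
theorem typo_core (key l : String) :
    typoScan key l kbKeys =
      (typoFirst l ((kbSrc.toList.map (fun c => String.ofList [c])).zip
                    (kbDst.toList.map (fun c => String.ofList [c])))).getD key := by
  by_cases h1 : "q" = l
  · subst h1; rfl
  by_cases h2 : "w" = l
  · subst h2; rfl
  by_cases h3 : "e" = l
  · subst h3; rfl
  by_cases h4 : "r" = l
  · subst h4; rfl
  by_cases h5 : "t" = l
  · subst h5; rfl
  by_cases h6 : "y" = l
  · subst h6; rfl
  by_cases h7 : "u" = l
  · subst h7; rfl
  by_cases h8 : "i" = l
  · subst h8; rfl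
  by_cases h9 : "o" = l
  · subst h9; rfl
  by_cases h10 : "p" = l
  · subst h10; rfl
  by_cases h11 : "a" = l
  · subst h11; rfl
  by_cases h12 : "s" = l
  · subst h12; rfl
  by_cases h13 : "d" = l
  · subst h13; rfl
  by_cases h14 : "f" = l
  · subst h14; rfl
  by_cases h15 : "g" = l
  · subst h15; rfl
  by_cases h16 : "h" = l
  · subst h16; rfl
  by_cases h17 : "j" = l
  · subst h17; rfl
  by_cases h18 : "k" = l
  · subst h18; rfl
  by_cases h19 : "l" = l
  · subst h19; rfl
  by_cases h20 : "z" = l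
  · subst h20; rfl
  by_cases h21 : "x" = l
  · subst h21; rfl
  by_cases h22 : "c" = l
  · subst h22; rfl
  by_cases h23 : "v" = l
  · subst h23; rfl
  by_cases h24 : "b" = l
  · subst h24; rfl
  by_cases h25 : "n" = l
  · subst h25; rfl
  by_cases h26 : "m" = l
  · subst h26; rfl
  -- l is none of the 26 letters: every comparison misses on both sides
  simp [typoScan, kbKeys, typoFirst, kbSrc, kbDst,
        h1, h2, h3, h4, h5, h6, h7, h8, h9, h10, h11, h12, h13, h14, h15, h16, h17, h18, h19, h20, h21, h22, h23, h24, h25, h26, (show l ≠ String.ofList ['q'] from Ne.symm h1), (show l ≠ String.ofList ['w'] from Ne.symm h2), (show l ≠ String.ofList ['e'] from Ne.symm h3), (show l ≠ String.ofList ['r'] from Ne.symm h4), (show l ≠ String.ofList ['t'] from Ne.symm h5), (show l ≠ String.ofList ['y'] from Ne.symm h6), (show l ≠ String.ofList ['u'] from Ne.symm h7), (show l ≠ String.ofList ['i'] from Ne.symm h8), (show l ≠ String.ofList ['o'] from Ne.symm h9), (show l ≠ String.ofList ['p'] from Ne.symm h10), (show l ≠ String.ofList ['a'] from Ne.symm h11),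 (show l ≠ String.ofList ['s'] from Ne.symm h12), (show l ≠ String.ofList ['d'] from Ne.symm h13), (show l ≠ String.ofList ['f'] from Ne.symm h14), (show l ≠ String.ofList ['g'] from Ne.symm h15), (show l ≠ String.ofList ['h'] from Ne.symm h16), (show l ≠ String.ofList ['j'] from Ne.symm h17), (show l ≠ String.ofList ['k'] from Ne.symm h18), (show l ≠ String.ofList ['l'] from Ne.symm h19), (show l ≠ String.ofList ['z'] from Ne.symm h20), (show l ≠ String.ofList ['x'] from Ne.symm h21), (show l ≠ String.ofList ['c'] from Ne.symm h22), (show l ≠ String.ofList ['v'] from Ne.symm h23), (show l ≠ String.ofList ['b'] from Ne.symm h24), (show l ≠ String.ofList ['n'] from Ne.symm h25), (show l ≠ String.ofList ['m'] from Ne.symm h26)]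

-- ===== VERDICT (by name: the statement is the Claim_ definition above) =====
theorem typoKey_spec : Claim_equal_typoKey := by
  intro key _
  unfold Spec_typoKey typoKey typoKey_alt
  exact typo_core key (PySem.Str.lower key)
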